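-- pv_equiv track=rewrite | github.com/kayo5000/Prosodic | phoneme_engine.py | get_rhyme_unit_from_phonemes
-- ===== SOURCE A (Python) =====
-- def get_rhyme_unit_from_phonemes(phonemes):
--     '''Extract rhyme unit (vowel nucleus onward) from a phoneme list.
--     Used to score individual syllables rather than whole words.'''
--     if not phonemes:
--         return None
--     last_stress_idx = None
--     for i, p in enumerate(phonemes):
--         if p[-1].isdigit() and int(p[-1]) >= 1:
--             last_stress_idx = i
--     if last_stress_idx is None:
--         for i, p in enumerate(phonemes):
--             if p[-1].isdigit():
--                 last_stress_idx = i
--     if last_stress_idx is None: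
--         return None
--     return tuple(phonemes[last_stress_idx:])
-- ===== SOURCE B (Python) =====
-- def get_rhyme_unit_from_phonemes(phonemes):
--     '''Extract rhyme unit (vowel nucleus onward) from a phoneme list.
--     Reverse scan with early exit: walking from the end, the first phoneme
--     whose last char is a digit >= 1 is the last primary stress overall, so we
--     can return immediately; the first digit-suffixed phoneme seen from the end
--     is remembered as the fallback.'''
--     first_any = None
--     for j in range(len(phonemes) - 1, -1, -1):
--         c = phonemes[j][-1]
--         if c.isdigit():
--             if int(c) >= 1:
--                 return tuple(phonemes[j:])
--             if first_any is None:
--                 first_any = j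
--     if first_any is None:
--         return None
--     return tuple(phonemes[first_any:])
-- ===== Notes on version B (the rewrite author's own statement) =====
-- stated objective: alternative
-- what changed: Replaces A's two full forward enumeration passes with a single backward scan that returns immediately at the first primary-stress phoneme seen from the end (which is the last one overall), remembering the first digit-suffixed index from the end as the fallback.
-- outside the precondition, e.g. on get_rhyme_unit_from_phonemes(['K', '', 'T']): A raises IndexError, B raises IndexError
import Mathlib
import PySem

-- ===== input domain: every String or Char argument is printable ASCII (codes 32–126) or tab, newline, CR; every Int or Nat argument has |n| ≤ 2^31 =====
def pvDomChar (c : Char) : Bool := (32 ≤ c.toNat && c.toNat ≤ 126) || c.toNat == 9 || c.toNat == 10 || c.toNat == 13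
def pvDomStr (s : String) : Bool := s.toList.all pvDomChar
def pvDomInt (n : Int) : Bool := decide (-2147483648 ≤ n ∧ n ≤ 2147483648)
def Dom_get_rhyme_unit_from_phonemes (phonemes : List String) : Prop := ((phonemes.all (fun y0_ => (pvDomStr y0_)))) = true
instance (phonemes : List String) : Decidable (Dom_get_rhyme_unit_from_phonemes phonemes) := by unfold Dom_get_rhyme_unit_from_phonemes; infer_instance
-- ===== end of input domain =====

-- B replaces A's two forward enumeration passes by one backward index scan with early exit at the last primary stress; equal return values on lists of nonempty strings.


-- ===== PORT A =====
-- p[-1].isdigit()  (p[-1] raises on "", excluded by Pre_; the `none` branch is that excluded case)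
def pvLastIsDigit (p : String) : Bool :=
  match PySem.Str.pyGet? p (-1) with
  | none => false
  | some c => PySem.Chars.isdigit c

-- int(p[-1]) >= 1  (int of the one-char string; only reached by the Pythons when the char is a digit)
def pvLastIntGE1 (p : String) : Bool :=
  match PySem.Str.pyGet? p (-1) with
  | none => false
  | some c => (PySem.Int.ofChars? [c]).getD 0 ≥ 1

-- A: first pass looks for the last primary-stress phoneme, a second full pass (only if none found) for the last digit-suffixed one.
def get_rhyme_unit_from_phonemes (phonemes : List String) : Option (List String) :=
  if phonemes = [] then none
  else
    let idx0 : Option Int := (PySem.List.enumerate phonemes 0).foldl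
      (fun acc ip => if pvLastIsDigit ip.2 && pvLastIntGE1 ip.2 then some ip.1 else acc) none
    let idx1 : Option Int :=
      match idx0 with
      | none => (PySem.List.enumerate phonemes 0).foldl
          (fun acc ip => if pvLastIsDigit ip.2 then some ip.1 else acc) none
      | some i => some i
    match idx1 with
    | none => none
    | some i => some (PySem.List.slice phonemes (some i) none)

-- ===== PORT B =====
-- B: `for j in range(len(phonemes)-1, -1, -1)`; recursion on k, the index visited being j = k - 1.
-- `return tuple(phonemes[j:])` the moment a primary stress is seen; `first_any` remembers the first digit index from the end.
def pvGoB (phonemes : List String) : Nat → Option Int → Option (List String)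
  | 0, firstAny =>
      match firstAny with
      | none => none
      | some j => some (PySem.List.slice phonemes (some j) none)
  | k+1, firstAny =>
      match PySem.List.pyGet? phonemes (k : Int) with
      | none => none   -- unreachable: k < len(phonemes) whenever pvGoB is called from the port
      | some p =>
        if pvLastIsDigit p then
          if pvLastIntGE1 p then some (PySem.List.slice phonemes (some (k : Int)) none)
          else pvGoB phonemes k (match firstAny with | none => some (k : Int) | some j => some j)
        else pvGoB phonemes k firstAny

def get_rhyme_unit_from_phonemes_alt (phonemes : List String) : Option (List String) :=
  pvGoB phonemes phonemes.length none

-- ===== PRECONDITION & SPEC =====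
-- Pre_ excludes lists containing an empty string: there p[-1] raises IndexError in both A and B.
def Pre_get_rhyme_unit_from_phonemes (phonemes : List String) : Prop := ∀ p ∈ phonemes, p ≠ ""
instance (phonemes : List String) : Decidable (Pre_get_rhyme_unit_from_phonemes phonemes) := by unfold Pre_get_rhyme_unit_from_phonemes; infer_instance
def pvWitness_get_rhyme_unit_from_phonemes : List String := ["K", "AE1", "T"]

def Spec_get_rhyme_unit_from_phonemes (phonemes : List String) (out : Option (List String)) : Prop := out = get_rhyme_unit_from_phonemes_alt phonemes
instance (phonemes : List String) (out : Option (List String)) : Decidable (Spec_get_rhyme_unit_from_phonemes phonemes out) := by unfold Spec_get_rhyme_unit_from_phonemes; infer_instance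

-- ===== CLAIM (what is proved, stated in full; the proofs are below) =====
def Claim_equal_get_rhyme_unit_from_phonemes : Prop := ∀ (phonemes : List String), Dom_get_rhyme_unit_from_phonemes phonemes → Pre_get_rhyme_unit_from_phonemes phonemes → Spec_get_rhyme_unit_from_phonemes phonemes (get_rhyme_unit_from_phonemes phonemes)

-- ===== LEMMAS AND PROOFS =====

-- "last index satisfying P" as A computes it, abstracted over the predicate
def pvLastMatch (P : String → Bool) (l : List (Int × String)) (a : Option Int) : Option Int :=
  l.foldl (fun acc ip => if P ip.2 then some ip.1 else acc) a

theorem pvLastMatch_append_singleton (P : String → Bool) (l : List (Int × String)) (x : Int × String) (a : Option Int) :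
    pvLastMatch P (l ++ [x]) a = if P x.2 then some x.1 else pvLastMatch P l a := by
  unfold pvLastMatch
  rw [List.foldl_append]
  simp only [List.foldl_cons, List.foldl_nil]

theorem pvEnumApp (l : List String) (x : String) (s : Int) :
    PySem.List.enumerate (l ++ [x]) s = PySem.List.enumerate l s ++ [(s + l.length, x)] := by
  simp [PySem.List.enumerate_append, PySem.List.enumerate_cons, PySem.List.enumerate_nil]

-- invariant of B's backward scan: over the first k elements it computes A's two "last match" indices, with
-- `firstAny` (found at indices ≥ k) taking priority in the fallback
theorem pvGoB_spec (phonemes : List String) (k : Nat) (hk : k ≤ phonemes.length) (fa : Option Int) :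
    pvGoB phonemes k fa =
      match pvLastMatch (fun p => pvLastIsDigit p && pvLastIntGE1 p) (PySem.List.enumerate (phonemes.take k) 0) none with
      | some i => some (PySem.List.slice phonemes (some i) none)
      | none =>
        match (match fa with
               | some j => some j
               | none => pvLastMatch pvLastIsDigit (PySem.List.enumerate (phonemes.take k) 0) none) with
        | some j => some (PySem.List.slice phonemes (some j) none)
        | none => none := by
  induction k generalizing fa with
  | zero =>
    cases fa <;> simp [pvGoB, pvLastMatch, PySem.List.enumerate_nil]
  | succ k ih =>
    have hk' : k < phonemes.length := by omega
    have hget : PySem.List.pyGet? phonemes (k : Int) = some phonemes[k] := by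
      simp [PySem.List.pyGet?_natCast, List.getElem?_eq_getElem hk']
    have htake : phonemes.take (k+1) = phonemes.take k ++ [phonemes[k]] := by
      rw [List.take_add_one, List.getElem?_eq_getElem hk']; rfl
    have hlen : ((phonemes.take k).length : Int) = (k : Int) := by
      simp [List.length_take, Nat.min_eq_left (le_of_lt hk')]
    rw [htake, pvEnumApp]
    simp only [hlen, zero_add]
    rw [pvLastMatch_append_singleton, pvLastMatch_append_singleton]
    simp only [pvGoB, hget]
    cases hd : pvLastIsDigit phonemes[k] <;> cases hg : pvLastIntGE1 phonemes[k] <;>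
        simp only [hd, hg, Bool.and_self, Bool.and_false, Bool.and_true,
          Bool.false_eq_true, if_true, if_false] <;>
      first
      | rfl
      | exact ih (by omega) fa
      | (rw [ih (by omega)]
         cases hp : pvLastMatch (fun p => pvLastIsDigit p && pvLastIntGE1 p)
             (PySem.List.enumerate (phonemes.take k) 0) none
         · cases fa <;> simp
         · simp)

-- ===== VERDICT (by name: the statement is the Claim_ definition above) =====
theorem get_rhyme_unit_from_phonemes_spec : Claim_equal_get_rhyme_unit_from_phonemes := by
  intro phonemes _ _
  unfold Spec_get_rhyme_unit_from_phonemes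
  unfold get_rhyme_unit_from_phonemes get_rhyme_unit_from_phonemes_alt
  rw [pvGoB_spec phonemes phonemes.length le_rfl none]
  simp only [List.take_length]
  by_cases hnil : phonemes = []
  · subst hnil
    simp [pvLastMatch, PySem.List.enumerate_nil]
  · simp only [hnil, if_false, pvLastMatch]
    cases h0 : (PySem.List.enumerate phonemes 0).foldl
        (fun acc ip => if pvLastIsDigit ip.2 && pvLastIntGE1 ip.2 then some ip.1 else acc) none with
    | none =>
      cases h1 : (PySem.List.enumerate phonemes 0).foldl
          (fun acc ip => if pvLastIsDigit ip.2 then some ip.1 else acc) none <;> simp [h0, h1]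
    | some i => simp [h0]
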